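-- pv_equiv track=rewrite | github.com/VarunReddyT/FS | 116 05-11-25 Trees + Greedy/SpecialMatrices.py | countSpecialMatrices
-- ===== SOURCE A (Python) =====
-- def isSpecial(mat, i, j, n, m):
--     nums = set()
--     for p in range(i, i+3):
--         for q in range(j, j+3):
--             nums.add(mat[p][q])
--
--     for p in range(1,10):
--         if p not in nums:
--             return False
--
--     rowSum = 0
--     colSum = 0
--
--     for col in range(j, j+3):
--         rowSum += mat[i][col]
--     for row in range(i+1, i+3):
--         tempRowSum = mat[row][j] + mat[row][j+1] + mat[row][j+2]
--         if tempRowSum != rowSum: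
--             return False
--
--     for row in range(i, i+3):
--         colSum += mat[row][j]
--     for col in range(j+1, j+3):
--         tempColSum = mat[i][col] + mat[i+1][col] + mat[i+2][col]
--         if tempColSum != colSum:
--             return False
--
--     if rowSum != colSum:
--         return False
--
--     diagonalSum = mat[i][j] + mat[i+1][j+1] + mat[i+2][j+2]
--
--     if diagonalSum != rowSum:
--         return False
--
--     antiDiagonalSum = mat[i][j+2] + mat[i+1][j+1] + mat[i+2][j]
--
--     if antiDiagonalSum != diagonalSum:
--         return False
--
--     return True
--
-- def countSpecialMatrices(mat,n,m):
--     if n<3 or m<3: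
--         return 0
--     res = 0
--     for i in range(n-2):
--         for j in range(m-2):
--             if isSpecial(mat,i,j,n,m):
--                 res += 1
--     return res
-- ===== SOURCE B (Python) =====
-- # Table-lookup re-implementation: the 8 magic squares over 1-9, flattened row-major.
-- _MAGIC = [
--     [2, 7, 6, 9, 5, 1, 4, 3, 8],
--     [2, 9, 4, 7, 5, 3, 6, 1, 8],
--     [4, 3, 8, 9, 5, 1, 2, 7, 6],
--     [4, 9, 2, 3, 5, 7, 8, 1, 6],
--     [6, 1, 8, 7, 5, 3, 2, 9, 4],
--     [6, 7, 2, 1, 5, 9, 8, 3, 4],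
--     [8, 1, 6, 3, 5, 7, 4, 9, 2],
--     [8, 3, 4, 1, 5, 9, 6, 7, 2],
-- ]
--
-- def countSpecialMatrices(mat, n, m):
--     if n < 3 or m < 3:
--         return 0
--     res = 0
--     for i in range(n - 2):
--         for j in range(m - 2):
--             window = [x for row in mat[i:i+3] for x in row[j:j+3]]
--             if window in _MAGIC:
--                 res += 1
--     return res
-- ===== Notes on version B (the rewrite author's own statement) =====
-- stated objective: alternative
-- what changed: isSpecial's set-building and row/column/diagonal sum checks are replaced by flattening each 3x3 window and looking it up in a precomputed table of the 8 magic squares over 1-9 (the Lo Shu square and its rotations/reflections).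
import Mathlib
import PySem

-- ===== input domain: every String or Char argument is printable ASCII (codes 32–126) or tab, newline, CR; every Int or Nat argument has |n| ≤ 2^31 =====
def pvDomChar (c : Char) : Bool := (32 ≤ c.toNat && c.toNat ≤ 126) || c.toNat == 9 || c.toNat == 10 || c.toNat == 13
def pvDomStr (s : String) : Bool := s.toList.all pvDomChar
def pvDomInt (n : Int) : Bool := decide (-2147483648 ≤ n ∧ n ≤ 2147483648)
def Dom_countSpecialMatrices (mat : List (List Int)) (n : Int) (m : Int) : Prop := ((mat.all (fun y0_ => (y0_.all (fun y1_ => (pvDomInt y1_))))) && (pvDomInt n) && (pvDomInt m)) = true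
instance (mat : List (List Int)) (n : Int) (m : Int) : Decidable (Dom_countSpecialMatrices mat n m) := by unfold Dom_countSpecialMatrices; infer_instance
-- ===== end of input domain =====

-- B replaces isSpecial's arithmetic checks by a lookup of the flattened 3x3 window in the
-- precomputed table of the 8 magic squares over 1..9 (alternative algorithm, similar cost).


-- ===== PORT A =====
def pvCell (mat : List (List Int)) (p q : Int) : Int :=
  PySem.List.pyGetD (PySem.List.pyGetD mat p []) q 0

def isSpecial (mat : List (List Int)) (i j n m : Int) : Bool :=
  let nums : PySem.Set Int :=
    (PySem.List.pyRange i (i+3) 1).foldl (fun s p =>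
      (PySem.List.pyRange j (j+3) 1).foldl (fun s q => PySem.Set.add s (pvCell mat p q)) s)
      PySem.Set.empty
  if ¬ ((PySem.List.pyRange 1 10 1).all (fun p => PySem.Set.contains nums p)) then false
  else
    let rowSum : Int := (PySem.List.pyRange j (j+3) 1).foldl (fun acc col => acc + pvCell mat i col) 0
    if ¬ ((PySem.List.pyRange (i+1) (i+3) 1).all (fun row =>
        pvCell mat row j + pvCell mat row (j+1) + pvCell mat row (j+2) == rowSum)) then false
    else
      let colSum : Int := (PySem.List.pyRange i (i+3) 1).foldl (fun acc row => acc + pvCell mat row j) 0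
      if ¬ ((PySem.List.pyRange (j+1) (j+3) 1).all (fun col =>
          pvCell mat i col + pvCell mat (i+1) col + pvCell mat (i+2) col == colSum)) then false
      else if rowSum ≠ colSum then false
      else
        let diagonalSum : Int := pvCell mat i j + pvCell mat (i+1) (j+1) + pvCell mat (i+2) (j+2)
        if diagonalSum ≠ rowSum then false
        else
          let antiDiagonalSum : Int := pvCell mat i (j+2) + pvCell mat (i+1) (j+1) + pvCell mat (i+2) j
          if antiDiagonalSum ≠ diagonalSum then false
          else true

def countSpecialMatrices (mat : List (List Int)) (n : Int) (m : Int) : Int :=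
  if n < 3 ∨ m < 3 then 0
  else
    (PySem.List.pyRange 0 (n-2) 1).foldl (fun res i =>
      (PySem.List.pyRange 0 (m-2) 1).foldl (fun res j =>
        if isSpecial mat i j n m then res + 1 else res) res) 0

-- ===== PORT B =====
-- the 8 magic squares over 1..9, flattened row-major (Source B's _MAGIC)
def pvMagic : List (List Int) :=
  [[2, 7, 6, 9, 5, 1, 4, 3, 8],
   [2, 9, 4, 7, 5, 3, 6, 1, 8],
   [4, 3, 8, 9, 5, 1, 2, 7, 6],
   [4, 9, 2, 3, 5, 7, 8, 1, 6],
   [6, 1, 8, 7, 5, 3, 2, 9, 4],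
   [6, 7, 2, 1, 5, 9, 8, 3, 4],
   [8, 1, 6, 3, 5, 7, 4, 9, 2],
   [8, 3, 4, 1, 5, 9, 6, 7, 2]]

def countSpecialMatrices_alt (mat : List (List Int)) (n : Int) (m : Int) : Int :=
  if n < 3 ∨ m < 3 then 0
  else
    (PySem.List.pyRange 0 (n-2) 1).foldl (fun res i =>
      (PySem.List.pyRange 0 (m-2) 1).foldl (fun res j =>
        if pvMagic.contains
            (((PySem.List.slice mat (some i) (some (i+3))).map
              (fun row => PySem.List.slice row (some j) (some (j+3)))).flatten)
        then res + 1 else res) res) 0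

-- ===== PRECONDITION & SPEC =====
-- Pre_ excludes exactly the inputs where Python A raises IndexError: when n,m ≥ 3 it reads
-- mat[p][q] for all p < n, q < m, so mat must have at least n rows and its first n rows length ≥ m.
def Pre_countSpecialMatrices (mat : List (List Int)) (n : Int) (m : Int) : Prop :=
  (3 ≤ n ∧ 3 ≤ m) → (n ≤ (mat.length : Int) ∧ ∀ r ∈ mat.take n.toNat, m ≤ (r.length : Int))
instance (mat : List (List Int)) (n : Int) (m : Int) : Decidable (Pre_countSpecialMatrices mat n m) := by unfold Pre_countSpecialMatrices; infer_instance

def pvWitness_countSpecialMatrices : List (List Int) × Int × Int :=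
  ([[2, 7, 6], [9, 5, 1], [4, 3, 8]], 3, 3)

def Spec_countSpecialMatrices (mat : List (List Int)) (n : Int) (m : Int) (out : Int) : Prop := out = countSpecialMatrices_alt mat n m
instance (mat : List (List Int)) (n : Int) (m : Int) (out : Int) : Decidable (Spec_countSpecialMatrices mat n m out) := by unfold Spec_countSpecialMatrices; infer_instance

-- ===== CLAIM (what is proved, stated in full; the proofs are below) =====
def Claim_equal_countSpecialMatrices : Prop := ∀ (mat : List (List Int)) (n : Int) (m : Int), Dom_countSpecialMatrices mat n m → Pre_countSpecialMatrices mat n m → Spec_countSpecialMatrices mat n m (countSpecialMatrices mat n m)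

-- ===== LEMMAS AND PROOFS =====

theorem pvMem9 (x : Int) (h : x ∈ ([1,2,3,4,5,6,7,8,9] : List Int)) : 1 ≤ x ∧ x ≤ 9 := by
  fin_cases h <;> omega

theorem pvSolve (a b c d e f g h k : Int)
    (h1 : d + e + f = 0 + a + b + c) (h2 : g + h + k = 0 + a + b + c)
    (h3 : b + e + h = 0 + a + d + g) (h4 : c + f + k = 0 + a + d + g)
    (h6 : a + e + k = 0 + a + b + c) (h7 : c + e + g = a + e + k)
    (hsum : a + (b + (c + (d + (e + (f + (g + (h + k))))))) = 45) :
    e = 5 ∧ c = 15 - a - b ∧ d = 20 - 2*a - b ∧ f = 2*a + b - 10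
      ∧ g = a + b - 5 ∧ h = 10 - b ∧ k = 10 - a := by omega

set_option maxHeartbeats 1000000 in
theorem pvAB (a b : Int) (h1 : 1 ≤ a) (h2 : a ≤ 9) (h3 : 1 ≤ b) (h4 : b ≤ 9)
    (hc : 1 ≤ 15-a-b ∧ 15-a-b ≤ 9) (hd : 1 ≤ 20-2*a-b ∧ 20-2*a-b ≤ 9)
    (hf : 1 ≤ 2*a+b-10 ∧ 2*a+b-10 ≤ 9) (hg : 1 ≤ a+b-5 ∧ a+b-5 ≤ 9)
    (nab : a ≠ b) (nac : a ≠ 15-a-b) (nad : a ≠ 20-2*a-b) (nae : a ≠ 5)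
    (naf : a ≠ 2*a+b-10) (nag : a ≠ a+b-5) (nbc : b ≠ 15-a-b) (ncf : 15-a-b ≠ 2*a+b-10) :
    (a=2∧b=7)∨(a=2∧b=9)∨(a=4∧b=3)∨(a=4∧b=9)∨(a=6∧b=1)∨(a=6∧b=7)∨(a=8∧b=1)∨(a=8∧b=3) := by
  interval_cases a <;> interval_cases b <;> omega

theorem pvChar (a b c d e f g h k : Int)
    (hmem : ∀ v ∈ ([1,2,3,4,5,6,7,8,9] : List Int), v ∈ ([a,b,c,d,e,f,g,h,k] : List Int))
    (h1 : d + e + f = 0 + a + b + c) (h2 : g + h + k = 0 + a + b + c)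
    (h3 : b + e + h = 0 + a + d + g) (h4 : c + f + k = 0 + a + d + g)
    (h5 : 0 + a + b + c = 0 + a + d + g)
    (h6 : a + e + k = 0 + a + b + c) (h7 : c + e + g = a + e + k) :
    [a,b,c,d,e,f,g,h,k] ∈ pvMagic := by
  have hsp : ([1,2,3,4,5,6,7,8,9] : List Int).Subperm [a,b,c,d,e,f,g,h,k] :=
    List.Nodup.subperm (by decide) (fun x hx => hmem x hx)
  have hperm : ([1,2,3,4,5,6,7,8,9] : List Int).Perm [a,b,c,d,e,f,g,h,k] :=
    hsp.perm_of_length_le (by simp)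
  have hnd : ([a,b,c,d,e,f,g,h,k] : List Int).Nodup := hperm.nodup_iff.mp (by decide)
  have hb9 : ∀ x ∈ ([a,b,c,d,e,f,g,h,k] : List Int), x ∈ ([1,2,3,4,5,6,7,8,9] : List Int) :=
    fun x hx => (hperm.mem_iff).mpr hx
  have hsum : a + (b + (c + (d + (e + (f + (g + (h + k))))))) = 45 := by
    have h45 := hperm.sum_eq
    simp only [List.sum_cons, List.sum_nil, add_zero] at h45
    omega
  obtain ⟨he, hc, hd, hf, hg, hh, hk⟩ := pvSolve a b c d e f g h k h1 h2 h3 h4 h6 h7 hsum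
  have hIa := pvMem9 a (hb9 a (by simp)); have hIb := pvMem9 b (hb9 b (by simp))
  have hIc := pvMem9 c (hb9 c (by simp)); have hId := pvMem9 d (hb9 d (by simp))
  have hIf := pvMem9 f (hb9 f (by simp)); have hIg := pvMem9 g (hb9 g (by simp))
  simp only [List.nodup_cons, List.mem_cons, List.not_mem_nil, or_false, not_or,
    List.nodup_nil, and_true] at hnd
  obtain ⟨⟨nab, nac, nad, nae, naf, nag, -, -⟩, ⟨nbc, -, -, -, -, -, -⟩, ⟨-, -, ncf, -, -, -⟩, -⟩ := hnd
  rw [hc] at nac nbc hIc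
  rw [hd] at nad hId
  rw [he] at nae
  rw [hf] at naf hIf
  rw [hc, hf] at ncf
  rw [hg] at nag hIg
  have hab := pvAB a b hIa.1 hIa.2 hIb.1 hIb.2 hIc hId hIf hIg nab nac nad nae naf nag nbc ncf
  subst hc hd he hf hg hh hk
  rcases hab with ⟨rfl,rfl⟩|⟨rfl,rfl⟩|⟨rfl,rfl⟩|⟨rfl,rfl⟩|⟨rfl,rfl⟩|⟨rfl,rfl⟩|⟨rfl,rfl⟩|⟨rfl,rfl⟩ <;> decide

theorem pvCharRev (a b c d e f g h k : Int) (hm : [a,b,c,d,e,f,g,h,k] ∈ pvMagic) :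
    (∀ v ∈ ([1,2,3,4,5,6,7,8,9] : List Int), v ∈ ([a,b,c,d,e,f,g,h,k] : List Int))
    ∧ d + e + f = 0 + a + b + c ∧ g + h + k = 0 + a + b + c
    ∧ b + e + h = 0 + a + d + g ∧ c + f + k = 0 + a + d + g
    ∧ 0 + a + b + c = 0 + a + d + g
    ∧ a + e + k = 0 + a + b + c ∧ c + e + g = a + e + k := by
  simp only [pvMagic, List.mem_cons, List.cons.injEq, List.not_mem_nil, or_false, and_true] at hm
  rcases hm with ⟨rfl,rfl,rfl,rfl,rfl,rfl,rfl,rfl,rfl⟩|⟨rfl,rfl,rfl,rfl,rfl,rfl,rfl,rfl,rfl⟩|⟨rfl,rfl,rfl,rfl,rfl,rfl,rfl,rfl,rfl⟩|⟨rfl,rfl,rfl,rfl,rfl,rfl,rfl,rfl,rfl⟩|⟨rfl,rfl,rfl,rfl,rfl,rfl,rfl,rfl,rfl⟩|⟨rfl,rfl,rfl,rfl,rfl,rfl,rfl,rfl,rfl⟩|⟨rfl,rfl,rfl,rfl,rfl,rfl,rfl,rfl,rfl⟩|⟨rfl,rfl,rfl,rfl,rfl,rfl,rfl,rfl,rfl⟩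 <;>
    exact ⟨by decide, by decide, by decide, by decide, by decide, by decide, by decide, by decide⟩

theorem pvGetD_nonneg {α : Type} (xs : List α) (i : Int) (d : α) (h : 0 ≤ i) :
    PySem.List.pyGetD xs i d = xs.getD i.toNat d := by
  rw [show i = ((i.toNat : Nat) : Int) from by omega, PySem.List.pyGetD_natCast]
  congr 1

theorem pvCell_eq (mat : List (List Int)) (p q : Int) (hp : 0 ≤ p) (hq : 0 ≤ q) :
    pvCell mat p q = (mat.getD p.toNat []).getD q.toNat 0 := by
  unfold pvCell
  rw [pvGetD_nonneg _ _ _ hp, pvGetD_nonneg _ _ _ hq]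

theorem pvTake3Drop {α : Type} (xs : List α) (k : Nat) (d : α) (h : k + 3 ≤ xs.length) :
    (xs.drop k).take 3 = [xs.getD k d, xs.getD (k+1) d, xs.getD (k+2) d] := by
  rw [List.drop_eq_getElem_cons (by omega), List.drop_eq_getElem_cons (by omega),
      List.drop_eq_getElem_cons (by omega), List.take_succ_cons, List.take_succ_cons,
      List.take_succ_cons, List.take_zero,
      List.getD_eq_getElem _ _ (by omega), List.getD_eq_getElem _ _ (by omega),
      List.getD_eq_getElem _ _ (by omega)]

theorem pvRange3 (i : Int) : PySem.List.pyRange i (i+3) 1 = [i, i+1, i+2] := by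
  rw [PySem.List.pyRange_one_cons (by omega), PySem.List.pyRange_one_cons (by omega),
      PySem.List.pyRange_one_cons (by omega), PySem.List.pyRange_one_eq_nil (by omega)]
  norm_num; omega

theorem pvRange2 (i : Int) : PySem.List.pyRange (i+1) (i+3) 1 = [i+1, i+2] := by
  rw [PySem.List.pyRange_one_cons (by omega), PySem.List.pyRange_one_cons (by omega),
      PySem.List.pyRange_one_eq_nil (by omega)]
  norm_num; omega

theorem pvR9 : PySem.List.pyRange 1 10 1 = [1,2,3,4,5,6,7,8,9] := by decide

theorem pvLtoMem (v a b c d e f g h k : Int)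
    (m : ((((((((v = a ∨ v = b) ∨ v = c) ∨ v = d) ∨ v = e) ∨ v = f) ∨ v = g) ∨ v = h) ∨ v = k)) :
    v ∈ ([a,b,c,d,e,f,g,h,k] : List Int) := by
  simp only [List.mem_cons, List.not_mem_nil, or_false]
  tauto

theorem pvRtoL (v a b c d e f g h k : Int)
    (m : v = a ∨ v = b ∨ v = c ∨ v = d ∨ v = e ∨ v = f ∨ v = g ∨ v = h ∨ v = k) :
    (((((((v = a ∨ v = b) ∨ v = c) ∨ v = d) ∨ v = e) ∨ v = f) ∨ v = g) ∨ v = h) ∨ v = k := by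
  tauto

set_option maxHeartbeats 2000000 in
theorem pvIsSpecial_eq (mat : List (List Int)) (i j n m : Int) :
    isSpecial mat i j n m = pvMagic.contains
      [pvCell mat i j, pvCell mat i (j+1), pvCell mat i (j+2),
       pvCell mat (i+1) j, pvCell mat (i+1) (j+1), pvCell mat (i+1) (j+2),
       pvCell mat (i+2) j, pvCell mat (i+2) (j+1), pvCell mat (i+2) (j+2)] := by
  unfold isSpecial
  rw [pvRange3 i, pvRange3 j, pvRange2 i, pvRange2 j, pvR9]
  simp only [List.foldl_cons, List.foldl_nil, List.all_cons, List.all_nil]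
  generalize pvCell mat i j = a
  generalize pvCell mat i (j+1) = b
  generalize pvCell mat i (j+2) = c
  generalize pvCell mat (i+1) j = d
  generalize pvCell mat (i+1) (j+1) = e
  generalize pvCell mat (i+1) (j+2) = f
  generalize pvCell mat (i+2) j = g
  generalize pvCell mat (i+2) (j+1) = h
  generalize pvCell mat (i+2) (j+2) = k
  rw [Bool.eq_iff_iff]
  constructor
  · intro hh
    split_ifs at hh with c1 c2 c3 c4 c5 c6
    · simp only [PySem.Set.contains, List.contains_eq_mem, PySem.Set.mem_add,
        decide_eq_true_eq, Bool.and_eq_true, beq_iff_eq] at c1 c2 c3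
      simp only [PySem.Set.empty, List.not_mem_nil, false_or] at c1
      obtain ⟨m1,m2,m3,m4,m5,m6,m7,m8,m9,-⟩ := c1
      obtain ⟨e1,e2,-⟩ := c2
      obtain ⟨e3,e4,-⟩ := c3
      rw [List.contains_eq_mem]
      refine decide_eq_true (pvChar a b c d e f g h k ?_ e1 e2 e3 e4
        (not_ne_iff.mp c4) (not_ne_iff.mp c5) (not_ne_iff.mp c6))
      intro v hv
      fin_cases hv
      exacts [pvLtoMem _ _ _ _ _ _ _ _ _ _ m1, pvLtoMem _ _ _ _ _ _ _ _ _ _ m2,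
        pvLtoMem _ _ _ _ _ _ _ _ _ _ m3, pvLtoMem _ _ _ _ _ _ _ _ _ _ m4,
        pvLtoMem _ _ _ _ _ _ _ _ _ _ m5, pvLtoMem _ _ _ _ _ _ _ _ _ _ m6,
        pvLtoMem _ _ _ _ _ _ _ _ _ _ m7, pvLtoMem _ _ _ _ _ _ _ _ _ _ m8,
        pvLtoMem _ _ _ _ _ _ _ _ _ _ m9]
  · intro hm
    have hmm : [a,b,c,d,e,f,g,h,k] ∈ pvMagic := by
      simpa [List.contains_eq_mem] using hm
    obtain ⟨hmem, e1,e2,e3,e4,e5,e6,e7⟩ := pvCharRev a b c d e f g h k hmm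
    have m1 := hmem 1 (by norm_num); have m2 := hmem 2 (by norm_num)
    have m3 := hmem 3 (by norm_num); have m4 := hmem 4 (by norm_num)
    have m5 := hmem 5 (by norm_num); have m6 := hmem 6 (by norm_num)
    have m7 := hmem 7 (by norm_num); have m8 := hmem 8 (by norm_num)
    have m9 := hmem 9 (by norm_num)
    simp only [List.mem_cons, List.not_mem_nil, or_false] at m1 m2 m3 m4 m5 m6 m7 m8 m9
    split_ifs with c1 c2 c3 c4 c5 c6
    · exact c4 e5
    · exact c5 e6
    · exact c6 e7
    · rfl
    · apply c3
      simp only [Bool.and_eq_true, beq_iff_eq]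
      exact ⟨e3, e4, trivial⟩
    · apply c2
      simp only [Bool.and_eq_true, beq_iff_eq]
      exact ⟨e1, e2, trivial⟩
    · apply c1
      simp only [PySem.Set.contains, List.contains_eq_mem, PySem.Set.mem_add,
        decide_eq_true_eq, Bool.and_eq_true,
        PySem.Set.empty, List.not_mem_nil, false_or]
      exact ⟨pvRtoL _ _ _ _ _ _ _ _ _ _ m1, pvRtoL _ _ _ _ _ _ _ _ _ _ m2,
        pvRtoL _ _ _ _ _ _ _ _ _ _ m3, pvRtoL _ _ _ _ _ _ _ _ _ _ m4,
        pvRtoL _ _ _ _ _ _ _ _ _ _ m5, pvRtoL _ _ _ _ _ _ _ _ _ _ m6,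
        pvRtoL _ _ _ _ _ _ _ _ _ _ m7, pvRtoL _ _ _ _ _ _ _ _ _ _ m8,
        pvRtoL _ _ _ _ _ _ _ _ _ _ m9, trivial⟩


theorem pvSliceRow (r : List Int) (j : Int) (hj : 0 ≤ j) (hr : j + 3 ≤ (r.length : Int)) :
    PySem.List.slice r (some j) (some (j+3)) =
      [r.getD j.toNat 0, r.getD (j.toNat+1) 0, r.getD (j.toNat+2) 0] := by
  have h3 : ((j+3).toNat - j.toNat) = 3 := by omega
  rw [PySem.List.slice_toNat r hj (by omega), h3, pvTake3Drop r j.toNat 0 (by omega)]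

theorem pvWindow_eq (mat : List (List Int)) (i j : Int) (hi : 0 ≤ i) (hj : 0 ≤ j)
    (hlen : i + 3 ≤ (mat.length : Int))
    (hrow : ∀ t : Nat, i.toNat ≤ t → t < i.toNat + 3 →
      j + 3 ≤ ((mat.getD t []).length : Int)) :
    ((PySem.List.slice mat (some i) (some (i+3))).map
      (fun row => PySem.List.slice row (some j) (some (j+3)))).flatten
    = [pvCell mat i j, pvCell mat i (j+1), pvCell mat i (j+2),
       pvCell mat (i+1) j, pvCell mat (i+1) (j+1), pvCell mat (i+1) (j+2),
       pvCell mat (i+2) j, pvCell mat (i+2) (j+1), pvCell mat (i+2) (j+2)] := by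
  have h3 : ((i+3).toNat - i.toNat) = 3 := by omega
  rw [PySem.List.slice_toNat mat hi (by omega), h3, pvTake3Drop mat i.toNat [] (by omega)]
  simp only [List.map_cons, List.map_nil]
  rw [pvSliceRow _ j hj (hrow i.toNat (by omega) (by omega)),
      pvSliceRow _ j hj (hrow (i.toNat+1) (by omega) (by omega)),
      pvSliceRow _ j hj (hrow (i.toNat+2) (by omega) (by omega))]
  rw [pvCell_eq mat i j hi hj, pvCell_eq mat i (j+1) hi (by omega),
      pvCell_eq mat i (j+2) hi (by omega), pvCell_eq mat (i+1) j (by omega) hj,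
      pvCell_eq mat (i+1) (j+1) (by omega) (by omega),
      pvCell_eq mat (i+1) (j+2) (by omega) (by omega),
      pvCell_eq mat (i+2) j (by omega) hj,
      pvCell_eq mat (i+2) (j+1) (by omega) (by omega),
      pvCell_eq mat (i+2) (j+2) (by omega) (by omega)]
  simp only [List.flatten_cons, List.flatten_nil, List.cons_append, List.nil_append,
    List.append_nil, show (i+1).toNat = i.toNat+1 from by omega,
    show (i+2).toNat = i.toNat+2 from by omega,
    show (j+1).toNat = j.toNat+1 from by omega,
    show (j+2).toNat = j.toNat+2 from by omega]

-- ===== VERDICT (by name: the statement is the Claim_ definition above) =====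
theorem countSpecialMatrices_spec : Claim_equal_countSpecialMatrices := by
  unfold Claim_equal_countSpecialMatrices Spec_countSpecialMatrices
  intro mat n m _hdom hpre
  unfold countSpecialMatrices countSpecialMatrices_alt
  split_ifs with hc
  · rfl
  · obtain ⟨hlen, hrows⟩ := hpre ⟨by omega, by omega⟩
    apply PySem.List.foldl_congr_mem
    intro acc i hi
    apply PySem.List.foldl_congr_mem
    intro acc2 jv hj
    rw [PySem.List.mem_pyRange_one] at hi hj
    have hrow : ∀ t : Nat, i.toNat ≤ t → t < i.toNat + 3 →
        jv + 3 ≤ ((mat.getD t []).length : Int) := by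
      intro t h1 h2
      have ht : t < mat.length := by omega
      have h' : t < (mat.take n.toNat).length := by
        rw [List.length_take]
        omega
      have hmem : mat[t]'ht ∈ mat.take n.toNat := by
        have := List.getElem_mem h'
        rwa [List.getElem_take] at this
      rw [List.getD_eq_getElem _ _ ht]
      exact le_trans (by omega) (hrows _ hmem)
    rw [pvIsSpecial_eq, pvWindow_eq mat i jv (by omega) (by omega) (by omega) hrow]
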